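-- pv_equiv track=rewrite | github.com/yichengtan0729-boop/sp_retrieval | scripts/eval_branches.py | build_gt
-- ===== SOURCE A (Python) =====
-- from collections import defaultdict
--
-- def build_gt(image_ids, text_ids):
--     """
--     image_ids: [N_imglike]
--     text_ids:  [N_txtlike] (这里只是顺序索引配套文本列表，不直接参与映射)
--     实际正样本关系由 image_id 决定：
--       - i2t: 同 image_id 的所有文本都是正样本
--       - t2i: 每个文本的正图像是与其 image_id 对应的唯一图像索引
--     """
--     img_to_txt = defaultdict(list)
--     txt_to_img = {}
--
--     unique_img_ids = []
--     seen = {}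
--     for i, img_id in enumerate(image_ids):
--         if img_id not in seen:
--             seen[img_id] = len(unique_img_ids)
--             unique_img_ids.append(img_id)
--
--     # 这里 image_ids 应该已经是“每个文本样本对应的 image_id”
--     # 我们之后会按 unique image 聚合图像特征，所以要建立 image_id -> image_index
--     image_id_to_unique_index = {img_id: idx for idx, img_id in enumerate(unique_img_ids)}
--
--     for txt_idx, img_id in enumerate(image_ids):
--         img_idx = image_id_to_unique_index[img_id]
--         img_to_txt[img_idx].append(txt_idx)
--         txt_to_img[txt_idx] = img_idx
--
--     return img_to_txt, txt_to_img, unique_img_ids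
-- ===== SOURCE B (Python) =====
-- from collections import defaultdict
--
-- def build_gt(image_ids, text_ids):
--     # Single fused pass: discover unique image ids and build both mappings together.
--     img_to_txt = defaultdict(list)
--     txt_to_img = {}
--     unique_img_ids = []
--     seen = {}
--     for txt_idx, img_id in enumerate(image_ids):
--         idx = seen.get(img_id)
--         if idx is None:
--             idx = len(unique_img_ids)
--             seen[img_id] = idx
--             unique_img_ids.append(img_id)
--         img_to_txt[idx].append(txt_idx)
--         txt_to_img[txt_idx] = idx
--     return img_to_txt, txt_to_img, unique_img_ids
-- ===== Notes on version B (the rewrite author's own statement) =====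
-- stated objective: simpler
-- what changed: A's three passes (dedup loop, index-map dict comprehension, mapping loop) are fused into one loop over enumerate(image_ids) that assigns each unseen image id its index on the fly, dropping the separate image_id_to_unique_index pass entirely.
import Mathlib
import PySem

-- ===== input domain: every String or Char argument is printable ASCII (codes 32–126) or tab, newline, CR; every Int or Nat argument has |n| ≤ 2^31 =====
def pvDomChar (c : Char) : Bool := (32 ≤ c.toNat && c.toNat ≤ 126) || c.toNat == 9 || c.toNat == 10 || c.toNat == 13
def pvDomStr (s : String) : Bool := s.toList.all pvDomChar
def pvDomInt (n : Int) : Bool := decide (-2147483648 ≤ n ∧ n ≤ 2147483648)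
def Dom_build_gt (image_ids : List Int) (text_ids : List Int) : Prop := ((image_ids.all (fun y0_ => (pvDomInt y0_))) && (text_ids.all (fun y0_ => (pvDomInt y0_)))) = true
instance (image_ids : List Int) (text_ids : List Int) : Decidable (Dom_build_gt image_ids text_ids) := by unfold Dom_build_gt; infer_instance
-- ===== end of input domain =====

-- B fuses A's three passes into one loop that assigns indices to unseen image ids on the fly (objective: simpler).

-- ===== PORT A =====
-- first loop of A: 'if img_id not in seen: seen[img_id]=len(unique); unique.append(img_id)'
def gtSeenStep (s : PySem.Dict Int Int × List Int) (img : Int) : PySem.Dict Int Int × List Int :=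
  if s.1.contains img then s else (s.1.insert img (s.2.length : Int), s.2 ++ [img])

-- the dict comprehension '{img_id: idx for idx, img_id in enumerate(unique_img_ids)}'
def gtIndexMap (u : List Int) : PySem.Dict Int Int :=
  (PySem.List.enumerate u 0).foldl (fun d p => d.insert p.2 p.1) PySem.Dict.empty

-- second loop of A; 'idmap[img_id]' is ported as getD with a dummy default: the key is
-- always present (img_id comes from image_ids, whose ids all occur in unique_img_ids)
def gtAssignStep (idmap : PySem.Dict Int Int)
    (st : PySem.Dict Int (List Int) × PySem.Dict Int Int) (p : Int × Int) :
    PySem.Dict Int (List Int) × PySem.Dict Int Int :=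
  (st.1.modify (idmap.getD p.2 0) [] (· ++ [p.1]), st.2.insert p.1 (idmap.getD p.2 0))

def build_gt (image_ids : List Int) (text_ids : List Int) :
    (List (Int × List Int)) × (List (Int × Int)) × List Int :=
  let su := image_ids.foldl gtSeenStep (PySem.Dict.empty, [])
  let idmap := gtIndexMap su.2
  let res := (PySem.List.enumerate image_ids 0).foldl (gtAssignStep idmap)
      (PySem.Dict.empty, PySem.Dict.empty)
  (res.1.items, res.2.items, su.2)

-- ===== PORT B =====
-- B's single fused loop body
def gtFuseStep
    (st : PySem.Dict Int (List Int) × PySem.Dict Int Int × PySem.Dict Int Int × List Int)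
    (p : Int × Int) :
    PySem.Dict Int (List Int) × PySem.Dict Int Int × PySem.Dict Int Int × List Int :=
  match st.2.2.1.get? p.2 with
  | some idx => (st.1.modify idx [] (· ++ [p.1]), st.2.1.insert p.1 idx, st.2.2.1, st.2.2.2)
  | none =>
      let idx : Int := st.2.2.2.length
      (st.1.modify idx [] (· ++ [p.1]), st.2.1.insert p.1 idx,
       st.2.2.1.insert p.2 idx, st.2.2.2 ++ [p.2])

def build_gt_alt (image_ids : List Int) (text_ids : List Int) :
    (List (Int × List Int)) × (List (Int × Int)) × List Int :=
  let st := (PySem.List.enumerate image_ids 0).foldl gtFuseStep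
      (PySem.Dict.empty, PySem.Dict.empty, PySem.Dict.empty, [])
  (st.1.items, st.2.1.items, st.2.2.2)

-- ===== PRECONDITION & SPEC =====
def Spec_build_gt (image_ids : List Int) (text_ids : List Int) (out : (List (Int × List Int)) × (List (Int × Int)) × List Int) : Prop := out = build_gt_alt image_ids text_ids
instance (image_ids : List Int) (text_ids : List Int) (out : (List (Int × List Int)) × (List (Int × Int)) × List Int) : Decidable (Spec_build_gt image_ids text_ids out) := by unfold Spec_build_gt; infer_instance

-- ===== CLAIM (what is proved, stated in full; the proofs are below) =====
def Claim_equal_build_gt : Prop := ∀ (image_ids : List Int) (text_ids : List Int), Dom_build_gt image_ids text_ids → Spec_build_gt image_ids text_ids (build_gt image_ids text_ids)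

-- ===== LEMMAS AND PROOFS =====

-- invariant: along A's first loop, the seen dict IS the index-map comprehension of unique
theorem gt_seen_eq_indexMap (l : List Int) (s : PySem.Dict Int Int × List Int)
    (h : s.1 = gtIndexMap s.2) :
    (l.foldl gtSeenStep s).1 = gtIndexMap (l.foldl gtSeenStep s).2 := by
  induction l generalizing s with
  | nil => simpa using h
  | cons x l ih =>
      simp only [List.foldl_cons]
      apply ih
      unfold gtSeenStep
      split
      · exact h
      · simp only [h, gtIndexMap, PySem.List.enumerate_append, List.foldl_append,
          PySem.List.enumerate_cons, PySem.List.enumerate_nil, List.foldl_cons, List.foldl_nil]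
        norm_num

-- monotonicity: bindings of the seen dict are never changed later
theorem gt_seen_mono (l : List Int) (s : PySem.Dict Int Int × List Int) (x v : Int)
    (h : s.1.get? x = some v) : (l.foldl gtSeenStep s).1.get? x = some v := by
  induction l generalizing s with
  | nil => simpa using h
  | cons y l ih =>
      simp only [List.foldl_cons]
      apply ih
      unfold gtSeenStep
      split
      · exact h
      · rename_i hc
        simp only [PySem.Dict.get?_insert]
        split
        · rename_i hxy
          subst hxy
          rw [PySem.Dict.contains_eq_isSome_get?, h] at hc
          simp at hc
        · exact h

-- fusion: B's single fold equals A's second fold (with the FINAL seen dict as index map)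
-- together with the continuation of A's first fold
theorem gt_fuse (q : List Int) (s : PySem.Dict Int Int × List Int)
    (i2t : PySem.Dict Int (List Int)) (t2i : PySem.Dict Int Int) (t0 : Int) :
    (PySem.List.enumerate q t0).foldl gtFuseStep (i2t, t2i, s) =
      (((PySem.List.enumerate q t0).foldl (gtAssignStep (q.foldl gtSeenStep s).1) (i2t, t2i)).1,
        ((PySem.List.enumerate q t0).foldl (gtAssignStep (q.foldl gtSeenStep s).1) (i2t, t2i)).2,
        q.foldl gtSeenStep s) := by
  induction q generalizing s i2t t2i t0 with
  | nil => simp [PySem.List.enumerate_nil]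
  | cons x q ih =>
      rw [PySem.List.enumerate_cons, List.foldl_cons, List.foldl_cons, List.foldl_cons]
      rcases hx : s.1.get? x with _ | i
      · -- x unseen: both sides assign index (length of unique so far)
        have hc : s.1.contains x = false := by
          rw [PySem.Dict.contains_eq_isSome_get?, hx]; rfl
        have hstep : gtSeenStep s x = (s.1.insert x (s.2.length : Int), s.2 ++ [x]) := by
          unfold gtSeenStep; rw [hc]; rfl
        have hF : (q.foldl gtSeenStep (gtSeenStep s x)).1.get? x = some (s.2.length : Int) := by
          apply gt_seen_mono
          rw [hstep]
          exact PySem.Dict.get?_insert_self _ _ _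
        have hB : gtFuseStep (i2t, t2i, s) (t0, x) =
            (i2t.modify (s.2.length : Int) [] (· ++ [t0]),
              t2i.insert t0 (s.2.length : Int), gtSeenStep s x) := by
          unfold gtFuseStep
          simp only [hx, hstep]
        rw [hB, ih]
        have hA : gtAssignStep (q.foldl gtSeenStep (gtSeenStep s x)).1 (i2t, t2i) (t0, x) =
            (i2t.modify (s.2.length : Int) [] (· ++ [t0]), t2i.insert t0 (s.2.length : Int)) := by
          unfold gtAssignStep
          simp only [PySem.Dict.getD_eq_get?_getD, hF, Option.getD_some]
        rw [hA]
      · -- x already seen at index i: the seen/unique state is unchanged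
        have hc : s.1.contains x = true := by
          rw [PySem.Dict.contains_eq_isSome_get?, hx]; rfl
        have hstep : gtSeenStep s x = s := by unfold gtSeenStep; rw [hc]; rfl
        have hF : (q.foldl gtSeenStep (gtSeenStep s x)).1.get? x = some i :=
          gt_seen_mono _ _ _ _ (by rw [hstep]; exact hx)
        have hB : gtFuseStep (i2t, t2i, s) (t0, x) =
            (i2t.modify i [] (· ++ [t0]), t2i.insert t0 i, gtSeenStep s x) := by
          unfold gtFuseStep
          simp only [hx, hstep]
        rw [hB, ih]
        have hA : gtAssignStep (q.foldl gtSeenStep (gtSeenStep s x)).1 (i2t, t2i) (t0, x) =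
            (i2t.modify i [] (· ++ [t0]), t2i.insert t0 i) := by
          unfold gtAssignStep
          simp only [PySem.Dict.getD_eq_get?_getD, hF, Option.getD_some]
        rw [hA]

-- ===== VERDICT (by name: the statement is the Claim_ definition above) =====
theorem build_gt_spec : Claim_equal_build_gt := by
  intro image_ids text_ids _
  unfold Spec_build_gt build_gt build_gt_alt
  simp only [gt_fuse image_ids (PySem.Dict.empty, []) PySem.Dict.empty PySem.Dict.empty 0,
    ← gt_seen_eq_indexMap image_ids (PySem.Dict.empty, []) rfl]
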